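-- pv_equiv track=rewrite | github.com/Jaster25/problem-solving | Programmers/[152995] 인사고과.py | solution
-- ===== SOURCE A (Python) =====
-- def solution(scores):
--     answer = 1
--
--     target_score = scores[0]
--     scores.sort(key = lambda x: (-x[0], x[1]))
--
--     max_score_b = -1
--     for score_a, score_b in scores:
--         if score_b >= max_score_b:
--             max_score_b = score_b
--             # 완호보다 석차가 좋은 경우
--             if score_a + score_b > sum(target_score):
--                 answer += 1
--         # 완호가 인센티브를 받지 못하는 경우 -1을 return
--         elif score_a == target_score[0] and score_b == target_score[1]:
--                 return -1
--
--     return answer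
-- ===== SOURCE B (Python) =====
-- def solution(scores):
--     # Brute-force Pareto-domination reformulation: no sort, no running max.
--     # NOTE: unlike A, this does not sort `scores` in place; equivalence is about the return value.
--     target = scores[0]
--     target_sum = target[0] + target[1]
--
--     def dominated(p):
--         return any(q[0] > p[0] and q[1] > p[1] for q in scores)
--
--     if dominated(target):
--         return -1
--     return 1 + sum(1 for p in scores
--                    if not dominated(p) and p[0] + p[1] > target_sum)
-- ===== Notes on version B (the rewrite author's own statement) =====
-- stated objective: alternative
-- what changed: Replaces A's sort-by-(-a,b) plus single running-max scan (with its max_score_b = -1 sentinel) by an unsorted quadratic Pareto-domination test: an employee is dominated iff some other employee beats both scores strictly; return -1 if the first employee is dominated, else 1 + the number of non-dominated employees whose score sum beats the first employee's.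
-- intended difference: On inputs whose first row t is not strictly dominated but where second components below -1 meet A's max_score_b = -1 sentinel (t[1] < -1, or some non-dominated row p with p[1] < -1 and p[0]+p[1] > t[0]+t[1]), A returns -1 resp. an undercount, while B returns the domination-based answer; B's value is the intended one because the sentinel is a leftover of the positive-score problem domain and -1 is meant to signal only 'the first employee is dominated'. — e.g. on solution([[-2, -2]]): A returns -1, B returns 1
import Mathlib
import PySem

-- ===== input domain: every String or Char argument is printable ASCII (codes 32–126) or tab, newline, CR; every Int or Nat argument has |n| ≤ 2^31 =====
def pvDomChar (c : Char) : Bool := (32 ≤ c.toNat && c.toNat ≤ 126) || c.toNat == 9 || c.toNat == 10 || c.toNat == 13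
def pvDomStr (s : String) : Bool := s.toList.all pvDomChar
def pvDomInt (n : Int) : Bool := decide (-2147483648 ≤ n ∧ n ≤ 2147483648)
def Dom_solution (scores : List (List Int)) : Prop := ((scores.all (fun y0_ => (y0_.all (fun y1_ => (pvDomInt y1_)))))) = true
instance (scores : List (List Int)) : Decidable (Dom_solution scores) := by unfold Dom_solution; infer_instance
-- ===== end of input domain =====

-- B replaces A's sort + running-max scan by an unsorted quadratic Pareto-domination test
-- (alternative algorithm, not faster); B does not reproduce A's in-place sort of `scores`,
-- so the equivalence claimed here is about the return value only.

-- ===== PORT A =====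
-- the for-loop over the sorted list, with Python's early `return -1`
def solutionLoop (target : List Int) (rows : List (List Int)) (maxScoreB answer : Int) : Int :=
  match rows with
  | [] => answer
  | row :: rest =>
    match row with
    | [scoreA, scoreB] =>
      if maxScoreB ≤ scoreB then
        solutionLoop target rest scoreB
          (if target.sum < scoreA + scoreB then answer + 1 else answer)
      else if scoreA = PySem.List.pyGetD target 0 0 ∧ scoreB = PySem.List.pyGetD target 1 0 then
        -1
      else
        solutionLoop target rest maxScoreB answer
    | _ => 0  -- Python raises on unpacking a row of length ≠ 2; excluded by Pre_solution

def solution (scores : List (List Int)) : Int :=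
  match PySem.List.pyGet? scores 0 with
  | none => 0  -- scores[0] raises IndexError on []; excluded by Pre_solution
  | some targetScore =>
    -- scores.sort(key = lambda x: (-x[0], x[1])); x[0]/x[1] raise on short rows (excluded by Pre_solution)
    solutionLoop targetScore
      (PySem.List.sorted2 scores
        (fun x => -(PySem.List.pyGetD x 0 0)) (fun x => PySem.List.pyGetD x 1 0))
      (-1) 1

-- ===== PORT B =====
def altDominated (scores : List (List Int)) (p : List Int) : Bool :=
  scores.any fun q =>
    decide (PySem.List.pyGetD p 0 0 < PySem.List.pyGetD q 0 0) &&
    decide (PySem.List.pyGetD p 1 0 < PySem.List.pyGetD q 1 0)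

def solution_alt (scores : List (List Int)) : Int :=
  match PySem.List.pyGet? scores 0 with
  | none => 0  -- scores[0] raises IndexError on []; excluded by Pre_solution
  | some target =>
    let targetSum := PySem.List.pyGetD target 0 0 + PySem.List.pyGetD target 1 0
    if altDominated scores target then -1
    else 1 + (((scores.filter fun p =>
        !altDominated scores p &&
        decide (targetSum < PySem.List.pyGetD p 0 0 + PySem.List.pyGetD p 1 0)).length : Nat) : Int)

-- ===== PRECONDITION & SPEC =====
-- Pre_: exactly where Python A returns normally — a nonempty list of rows of length 2
-- (scores[0] raises IndexError on []; `for a, b in scores` / the key's x[0], x[1] raise on any other row length).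
def Pre_solution (scores : List (List Int)) : Prop :=
  scores ≠ [] ∧ ∀ r ∈ scores, r.length = 2

instance (scores : List (List Int)) : Decidable (Pre_solution scores) := by
  unfold Pre_solution; infer_instance

def pvWitness_solution : List (List Int) := [[1, 1]]

-- "p is dominated by nobody in s": no row beats both of p's scores strictly (input-shape predicate for D_)
def pvNotDom (s : List (List Int)) (p : List Int) : Prop :=
  ∀ q ∈ s, p.getD 0 0 < q.getD 0 0 → q.getD 1 0 ≤ p.getD 1 0

-- On inputs whose first row t is not strictly dominated but where second components below -1 meet
-- A's `max_score_b = -1` sentinel (t[1] < -1, or some non-dominated row p with p[1] < -1 and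
-- p[0]+p[1] > t[0]+t[1]), A returns -1 resp. an undercount, while B returns the domination-based
-- answer; B's value is the intended one because the sentinel is a leftover of the positive-score
-- problem domain and -1 is meant to signal only "the first employee is dominated".
def pvSum (p : List Int) : Int := p.getD 0 0 + p.getD 1 0

def D_solution (scores : List (List Int)) : Prop :=
  pvNotDom scores scores.headI ∧
  ∃ p ∈ scores, p.getD 1 0 < -1 ∧ pvNotDom scores p ∧
    (p = scores.headI ∨ pvSum scores.headI < pvSum p)

instance (scores : List (List Int)) : Decidable (D_solution scores) := by
  unfold D_solution pvNotDom; infer_instance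

def Spec_solution (scores : List (List Int)) (out : Int) : Prop :=
  ¬ D_solution scores → out = solution_alt scores
instance (scores : List (List Int)) (out : Int) : Decidable (Spec_solution scores out) := by
  unfold Spec_solution; infer_instance

def pvDiffWitness_solution : List (List Int) := [[-2, -2]]
def pvDiffWitnessOut_solution : Int × Int := (-1, 1)

-- ===== CLAIM (what is proved, stated in full; the proofs are below) =====
def Claim_unchanged_solution : Prop :=
  ∀ (scores : List (List Int)), Dom_solution scores → Pre_solution scores →
    Spec_solution scores (solution scores)

def Claim_changed_solution : Prop :=
  Dom_solution (pvDiffWitness_solution) ∧ Pre_solution (pvDiffWitness_solution) ∧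
  D_solution (pvDiffWitness_solution) ∧
  solution (pvDiffWitness_solution) = pvDiffWitnessOut_solution.1 ∧
  solution_alt (pvDiffWitness_solution) = pvDiffWitnessOut_solution.2 ∧
  pvDiffWitnessOut_solution.1 ≠ pvDiffWitnessOut_solution.2

def Claim_exact_solution : Prop :=
  ∀ (scores : List (List Int)), Dom_solution scores → Pre_solution scores →
    D_solution scores → solution scores ≠ solution_alt scores

-- ===== LEMMAS AND PROOFS =====

-- first and second component of a row, as A reads them after the length-2 unpack
def ga (r : List Int) : Int := r.getD 0 0
def gb (r : List Int) : Int := r.getD 1 0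

lemma pyGetD_zero (r : List Int) : PySem.List.pyGetD r 0 0 = ga r := by
  cases r <;> simp [PySem.List.pyGetD, PySem.List.pyGet?, PySem.List.pyIdx?, ga]

lemma pyGetD_one (r : List Int) : PySem.List.pyGetD r 1 0 = gb r := by
  match r with
  | [] => simp [PySem.List.pyGetD, PySem.List.pyGet?, PySem.List.pyIdx?, gb]
  | [x] => simp [PySem.List.pyGetD, PySem.List.pyGet?, PySem.List.pyIdx?, gb]
  | x :: y :: t => simp [PySem.List.pyGetD, PySem.List.pyGet?, PySem.List.pyIdx?, gb]

lemma sum_len2 (r : List Int) (h : r.length = 2) : r.sum = ga r + gb r := by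
  match r with
  | [x, y] => simp [ga, gb]

-- Boolean forms of the domination / kept predicates, for countP
def pvNotDomB (s : List (List Int)) (p : List Int) : Bool :=
  s.all fun q => !(decide (ga p < ga q) && decide (gb p < gb q))

lemma pvNotDomB_iff (s : List (List Int)) (p : List Int) :
    pvNotDomB s p = true ↔ pvNotDom s p := by
  unfold pvNotDomB pvNotDom ga gb
  simp
  constructor <;> · intro h q hq; have := h q hq; omega

-- A's effective "kept" test, stated independently of the position in the scan
def keepsB (s : List (List Int)) (r : List Int) : Bool :=
  pvNotDomB s r && decide (-1 ≤ gb r)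

lemma keepsB_iff (s : List (List Int)) (r : List Int) :
    keepsB s r = true ↔ pvNotDom s r ∧ -1 ≤ gb r := by
  unfold keepsB
  simp [pvNotDomB_iff]

-- Python's sort key order: (-a, b) lexicographically
def lexLe (x y : List Int) : Prop :=
  -(ga x) < -(ga y) ∨ (-(ga x) = -(ga y) ∧ gb x ≤ gb y)

lemma lexLe_trans {x y z : List Int} (h1 : lexLe x y) (h2 : lexLe y z) : lexLe x z := by
  unfold lexLe at *; omega

-- the comparison function sorted2 uses, specialised to A's key
def pvBef (a b : List Int) : Bool :=
  decide (-(PySem.List.pyGetD a 0 0) < -(PySem.List.pyGetD b 0 0)) ||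
  (!decide (-(PySem.List.pyGetD b 0 0) < -(PySem.List.pyGetD a 0 0)) &&
    decide (PySem.List.pyGetD a 1 0 < PySem.List.pyGetD b 1 0))

lemma pvBef_true {a b : List Int} (h : pvBef a b = true) : lexLe a b := by
  simp only [pvBef, pyGetD_zero, pyGetD_one, Bool.or_eq_true, Bool.and_eq_true,
    Bool.not_eq_eq_eq_not, Bool.not_true, decide_eq_true_eq, decide_eq_false_iff_not] at h
  unfold lexLe; omega

lemma pvBef_false {a b : List Int} (h : pvBef a b = false) : lexLe b a := by
  simp only [pvBef, Bool.or_eq_false_iff, Bool.and_eq_false_iff,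
    Bool.not_eq_eq_eq_not, Bool.not_false, pyGetD_zero, pyGetD_one,
    decide_eq_false_iff_not, decide_eq_true_eq] at h
  unfold lexLe; omega

lemma insertBy_pairwise (x : List Int) (ys : List (List Int))
    (h : ys.Pairwise lexLe) : (PySem.List.insertBy pvBef x ys).Pairwise lexLe := by
  induction ys with
  | nil => simp [PySem.List.insertBy]
  | cons y ys ih =>
    rw [List.pairwise_cons] at h
    by_cases hb : pvBef x y = true
    · show (PySem.List.insertBy pvBef x (y :: ys)).Pairwise lexLe
      simp only [PySem.List.insertBy, hb, if_true]
      refine List.Pairwise.cons ?_ (List.Pairwise.cons h.1 h.2)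
      intro z hz
      rcases List.mem_cons.mp hz with rfl | hz'
      · exact pvBef_true hb
      · exact lexLe_trans (pvBef_true hb) (h.1 z hz')
    · have hb' : pvBef x y = false := by simpa using hb
      show (PySem.List.insertBy pvBef x (y :: ys)).Pairwise lexLe
      simp only [PySem.List.insertBy, hb', Bool.false_eq_true, if_false]
      refine List.Pairwise.cons ?_ (ih h.2)
      intro z hz
      rw [PySem.List.mem_insertBy] at hz
      rcases hz with rfl | hz'
      · exact pvBef_false hb'
      · exact h.1 z hz'

lemma foldl_insertBy_pairwise (xs : List (List Int)) :
    ∀ acc : List (List Int), acc.Pairwise lexLe →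
      (xs.foldl (fun acc x => PySem.List.insertBy pvBef x acc) acc).Pairwise lexLe := by
  induction xs with
  | nil => intro acc h; simpa using h
  | cons x xs ih =>
    intro acc h
    exact ih _ (insertBy_pairwise x acc h)

-- the sorted list A scans
def pvSorted (scores : List (List Int)) : List (List Int) :=
  PySem.List.sorted2 scores
    (fun x => -(PySem.List.pyGetD x 0 0)) (fun x => PySem.List.pyGetD x 1 0)

lemma pvSorted_pairwise (scores : List (List Int)) : (pvSorted scores).Pairwise lexLe := by
  have h : pvSorted scores =
      scores.foldl (fun acc x => PySem.List.insertBy pvBef x acc) [] := rfl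
  rw [h]
  exact foldl_insertBy_pairwise scores [] (by simp)

lemma pvSorted_perm (scores : List (List Int)) : (pvSorted scores).Perm scores :=
  PySem.List.sorted2_perm scores _ _ false

lemma notDom_congr {s s' : List (List Int)} (hp : s'.Perm s) (r : List Int) :
    pvNotDom s' r ↔ pvNotDom s r := by
  unfold pvNotDom
  constructor <;> intro h q hq
  · exact h q (hp.mem_iff.mpr hq)
  · exact h q (hp.mem_iff.mp hq)

lemma notDom_val {s : List (List Int)} {r r' : List Int}
    (h0 : ga r = ga r') (h1 : gb r = gb r') : pvNotDom s r ↔ pvNotDom s r' := by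
  unfold pvNotDom ga gb at *
  rw [h0, h1]

-- running max of gb over the consumed prefix, seeded with A's -1
def maxPref (P : List (List Int)) : Int := P.foldl (fun m r => max m (gb r)) (-1)

lemma maxPref_append (P : List (List Int)) (r : List Int) :
    maxPref (P ++ [r]) = max (maxPref P) (gb r) := by
  simp [maxPref, List.foldl_append]

lemma le_maxPref (P : List (List Int)) : -1 ≤ maxPref P ∧ ∀ q ∈ P, gb q ≤ maxPref P :=
  PySem.List.le_foldl_max_int P gb (-1)

lemma foldl_max_le (P : List (List Int)) (m : Int) :
    ∀ s : Int, s ≤ m → (∀ q ∈ P, gb q ≤ m) →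
      P.foldl (fun acc r => max acc (gb r)) s ≤ m := by
  induction P with
  | nil => intro s hs _; simpa using hs
  | cons p P ih =>
    intro s hs h
    simp only [List.foldl_cons]
    exact ih _ (by
      have := h p List.mem_cons_self
      omega) (fun q hq => h q (List.mem_cons_of_mem _ hq))

lemma maxPref_le (P : List (List Int)) (m : Int) (h0 : -1 ≤ m)
    (h : ∀ q ∈ P, gb q ≤ m) : maxPref P ≤ m :=
  foldl_max_le P m (-1) h0 h

-- kept-test characterisation at the head of the remaining list
lemma kept_iff (S P L : List (List Int)) (r : List Int)
    (hpw : (P ++ r :: L).Pairwise lexLe)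
    (hperm : (P ++ r :: L).Perm S) :
    (maxPref P ≤ gb r) ↔ (pvNotDom S r ∧ -1 ≤ gb r) := by
  obtain ⟨hP, hcross, hrL⟩ :
      P.Pairwise lexLe ∧ (∀ a ∈ P, ∀ b ∈ r :: L, lexLe a b) ∧ (r :: L).Pairwise lexLe := by
    have := List.pairwise_append.mp hpw
    exact ⟨this.1, this.2.2, this.2.1⟩
  have hrL' : ∀ b ∈ L, lexLe r b := (List.pairwise_cons.mp hrL).1
  constructor
  · intro hm
    refine ⟨(notDom_congr hperm r).mp ?_, le_trans (le_maxPref P).1 hm⟩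
    intro q hq hlt
    rcases List.mem_append.mp hq with hqP | hqrL
    · have := (le_maxPref P).2 q hqP
      unfold ga gb at *
      omega
    · rcases List.mem_cons.mp hqrL with rfl | hqL
      · omega
      · have := hrL' q hqL
        unfold lexLe ga gb at *
        omega
  · rintro ⟨hnd, hge⟩
    have hnd' : pvNotDom (P ++ r :: L) r := (notDom_congr hperm r).mpr hnd
    refine maxPref_le P (gb r) hge ?_
    intro q hqP
    have hle := hcross q hqP r List.mem_cons_self
    have hq := hnd' q (List.mem_append.mpr (Or.inl hqP))
    unfold lexLe at hle
    unfold ga gb at *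
    omega

lemma countP_cons_int {α : Type} (pr : α → Bool) (r : α) (L : List α) :
    ((List.countP pr (r :: L) : Nat) : Int) =
      (List.countP pr L : Int) + (if pr r = true then 1 else 0) := by
  rw [List.countP_cons]
  by_cases h : pr r = true
  · simp [h]
  · simp [h]

lemma loop_count (S : List (List Int)) (t : List Int) (hlen : ∀ x ∈ S, x.length = 2)
    (hlt : t.length = 2)
    (hsafe : ∀ r ∈ S, ga r = ga t ∧ gb r = gb t → pvNotDom S r ∧ -1 ≤ gb r) :
    ∀ (L P : List (List Int)) (ans : Int),
      (P ++ L).Pairwise lexLe → (P ++ L).Perm S →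
      solutionLoop t L (maxPref P) ans =
        ans + ((L.countP fun r =>
          keepsB S r && decide (ga t + gb t < ga r + gb r)) : Int) := by
  intro L
  induction L with
  | nil => intro P ans _ _; simp [solutionLoop]
  | cons r L ih =>
    intro P ans hpw hperm
    have hrS : r ∈ S := hperm.mem_iff.mp (List.mem_append.mpr (Or.inr List.mem_cons_self))
    obtain ⟨a, b, rfl⟩ : ∃ a b, r = [a, b] := by
      have := hlen r hrS
      match r with
      | [x, y] => exact ⟨x, y, rfl⟩
    have hga : ga [a, b] = a := rfl
    have hgb : gb [a, b] = b := rfl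
    have hsum : t.sum = ga t + gb t := sum_len2 t hlt
    have hkiff := kept_iff S P L [a, b] hpw hperm
    have hassoc : (P ++ [[a, b]]) ++ L = P ++ [a, b] :: L := by simp
    by_cases hk : keepsB S [a, b] = true
    · have hk' := (keepsB_iff S [a, b]).mp hk
      have hm : maxPref P ≤ b := by
        have := hkiff.mpr hk'
        simpa [gb] using this
      have hnew : maxPref (P ++ [[a, b]]) = b := by
        rw [maxPref_append, hgb]
        omega
      have hpr : (keepsB S [a, b] && decide (ga t + gb t < ga [a, b] + gb [a, b])) =
          decide (ga t + gb t < a + b) := by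
        simp [hk, ga, gb]
      have ih' := ih (P ++ [[a, b]]) (if ga t + gb t < a + b then ans + 1 else ans)
        (by rwa [hassoc]) (by rwa [hassoc])
      rw [hnew] at ih'
      show solutionLoop t ([a, b] :: L) (maxPref P) ans = _
      rw [solutionLoop]
      rw [if_pos hm, hsum]
      rw [ih', countP_cons_int, hpr]
      by_cases hs : ga t + gb t < a + b
      · rw [if_pos hs, if_pos (by simp [hs])]
        ring
      · rw [if_neg hs, if_neg (by simp [hs])]
        ring
    · have hk' : ¬(pvNotDom S [a, b] ∧ -1 ≤ gb [a, b]) := fun h => hk ((keepsB_iff S [a, b]).mpr h)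
      have hm : ¬(maxPref P ≤ b) := by
        intro hcon
        exact hk' (hkiff.mp (by simpa [gb] using hcon))
      have htv : ¬(a = PySem.List.pyGetD t 0 0 ∧ b = PySem.List.pyGetD t 1 0) := by
        rw [pyGetD_zero t, pyGetD_one t]
        rintro ⟨h1, h2⟩
        exact hk' (hsafe [a, b] hrS ⟨by rw [hga, h1], by rw [hgb, h2]⟩)
      have hnew : maxPref (P ++ [[a, b]]) = maxPref P := by
        rw [maxPref_append, hgb]
        omega
      have hpr : (keepsB S [a, b] && decide (ga t + gb t < ga [a, b] + gb [a, b])) = false := by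
        simp [Bool.eq_false_iff.mpr hk]
      have ih' := ih (P ++ [[a, b]]) ans (by rwa [hassoc]) (by rwa [hassoc])
      rw [hnew] at ih'
      show solutionLoop t ([a, b] :: L) (maxPref P) ans = _
      rw [solutionLoop]
      rw [if_neg hm, if_neg htv]
      rw [ih', countP_cons_int, hpr]
      simp

lemma loop_bad (S : List (List Int)) (t : List Int) (hlen : ∀ x ∈ S, x.length = 2)
    (hbad : ¬(pvNotDom S t ∧ -1 ≤ gb t)) :
    ∀ (L P : List (List Int)) (ans : Int),
      (P ++ L).Pairwise lexLe → (P ++ L).Perm S →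
      (∃ r ∈ L, ga r = ga t ∧ gb r = gb t) →
      solutionLoop t L (maxPref P) ans = -1 := by
  intro L
  induction L with
  | nil => rintro P ans _ _ ⟨r, hr, _⟩; cases hr
  | cons r L ih =>
    rintro P ans hpw hperm ⟨w, hw, hwv⟩
    have hrS : r ∈ S := hperm.mem_iff.mp (List.mem_append.mpr (Or.inr List.mem_cons_self))
    obtain ⟨a, b, rfl⟩ : ∃ a b, r = [a, b] := by
      have := hlen r hrS
      match r with
      | [x, y] => exact ⟨x, y, rfl⟩
    have hga : ga [a, b] = a := rfl
    have hgb : gb [a, b] = b := rfl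
    have hkiff := kept_iff S P L [a, b] hpw hperm
    have hassoc : (P ++ [[a, b]]) ++ L = P ++ [a, b] :: L := by simp
    by_cases htv : a = ga t ∧ b = gb t
    · -- this row carries the target's values, and the target is not kept: Python returns -1 here
      have hkr : ¬(pvNotDom S [a, b] ∧ -1 ≤ gb [a, b]) := by
        rintro ⟨hnd, hge⟩
        refine hbad ⟨?_, ?_⟩
        · exact (notDom_val (by rw [hga, htv.1]) (by rw [hgb, htv.2])).mp hnd
        · rw [hgb, htv.2] at hge
          exact hge
      have hm : ¬(maxPref P ≤ b) := by
        intro hcon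
        exact hkr (hkiff.mp (by simpa [gb] using hcon))
      show solutionLoop t ([a, b] :: L) (maxPref P) ans = -1
      rw [solutionLoop]
      rw [if_neg hm,
        if_pos ⟨by rw [pyGetD_zero t]; exact htv.1, by rw [pyGetD_one t]; exact htv.2⟩]
    · have hwL : w ∈ L := by
        rcases List.mem_cons.mp hw with rfl | h
        · exact absurd ⟨hwv.1, hwv.2⟩ htv
        · exact h
      by_cases hm : maxPref P ≤ b
      · have hnew : maxPref (P ++ [[a, b]]) = b := by
          rw [maxPref_append, hgb]
          omega
        have ih' := ih (P ++ [[a, b]]) (if t.sum < a + b then ans + 1 else ans)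
          (by rwa [hassoc]) (by rwa [hassoc]) ⟨w, hwL, hwv⟩
        rw [hnew] at ih'
        show solutionLoop t ([a, b] :: L) (maxPref P) ans = -1
        rw [solutionLoop]
        rw [if_pos hm]
        exact ih'
      · have htv' : ¬(a = PySem.List.pyGetD t 0 0 ∧ b = PySem.List.pyGetD t 1 0) := by
          rw [pyGetD_zero t, pyGetD_one t]
          exact htv
        have hnew : maxPref (P ++ [[a, b]]) = maxPref P := by
          rw [maxPref_append, hgb]
          omega
        have ih' := ih (P ++ [[a, b]]) ans (by rwa [hassoc]) (by rwa [hassoc]) ⟨w, hwL, hwv⟩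
        rw [hnew] at ih'
        show solutionLoop t ([a, b] :: L) (maxPref P) ans = -1
        rw [solutionLoop]
        rw [if_neg hm, if_neg htv']
        exact ih'

lemma countP_lt {α : Type} (p q : α → Bool) (l : List α)
    (hpq : ∀ x ∈ l, p x = true → q x = true)
    (x : α) (hx : x ∈ l) (hpx : p x = false) (hqx : q x = true) :
    l.countP p < l.countP q := by
  induction l with
  | nil => cases hx
  | cons y l ih =>
    rcases List.mem_cons.mp hx with rfl | hx'
    · have hle : l.countP p ≤ l.countP q :=
        List.countP_mono_left (fun z hz => hpq z (List.mem_cons_of_mem _ hz))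
      rw [List.countP_cons, List.countP_cons, hpx, hqx]
      simp
      omega
    · have h1 := ih (fun z hz => hpq z (List.mem_cons_of_mem _ hz)) hx'
      have h2 : (if p y = true then (1 : Nat) else 0) ≤ (if q y = true then 1 else 0) := by
        by_cases hy : p y = true
        · rw [if_pos hy, if_pos (hpq y List.mem_cons_self hy)]
        · rw [if_neg hy]
          by_cases hqy : q y = true
          · rw [if_pos hqy]; omega
          · rw [if_neg hqy]
      rw [List.countP_cons, List.countP_cons]
      omega

lemma altDominated_iff (s : List (List Int)) (p : List Int) :
    altDominated s p = true ↔ ¬ pvNotDom s p := by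
  unfold altDominated pvNotDom
  simp only [List.any_eq_true, Bool.and_eq_true, decide_eq_true_eq,
    pyGetD_zero, pyGetD_one]
  unfold ga gb
  push_neg
  constructor
  · rintro ⟨q, hq, h1, h2⟩
    exact ⟨q, hq, h1, h2⟩
  · rintro ⟨q, hq, h1, h2⟩
    exact ⟨q, hq, h1, h2⟩

lemma altDominated_eq (s : List (List Int)) (p : List Int) :
    altDominated s p = !pvNotDomB s p := by
  cases h : pvNotDomB s p
  · simp only [Bool.not_false]
    refine (altDominated_iff s p).mpr ?_
    intro hnd
    exact absurd ((pvNotDomB_iff s p).mpr hnd) (by simp [h])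
  · simp only [Bool.not_true]
    rw [← Bool.not_eq_true, altDominated_iff]
    exact not_not_intro ((pvNotDomB_iff s p).mp h)

-- closed form for port B on a nonempty list
lemma solution_alt_eq (t : List Int) (rest : List (List Int)) :
    solution_alt (t :: rest) =
      (if pvNotDomB (t :: rest) t then
        1 + (((t :: rest).countP fun p =>
          pvNotDomB (t :: rest) p && decide (ga t + gb t < ga p + gb p)) : Int)
      else -1) := by
  have hget : PySem.List.pyGet? (t :: rest) (0 : Int) = some t := by
    simp [PySem.List.pyGet?, PySem.List.pyIdx?]
  have hs1 : solution_alt (t :: rest) =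
      (if altDominated (t :: rest) t then -1
       else 1 + ((((t :: rest).filter fun p =>
          !altDominated (t :: rest) p &&
          decide (PySem.List.pyGetD t 0 0 + PySem.List.pyGetD t 1 0 <
            PySem.List.pyGetD p 0 0 + PySem.List.pyGetD p 1 0)).length : Nat) : Int)) := by
    unfold solution_alt
    rw [hget]
  rw [hs1]
  simp only [← List.countP_eq_length_filter]
  simp only [altDominated_eq, Bool.not_not, pyGetD_zero, pyGetD_one]
  cases hd : pvNotDomB (t :: rest) t
  · simp
  · simp

-- closed form for port A on a Pre_ input
lemma solution_eq (t : List Int) (rest : List (List Int))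
    (hlen : ∀ x ∈ (t :: rest), x.length = 2) :
    solution (t :: rest) =
      (if keepsB (t :: rest) t then
        1 + (((t :: rest).countP fun r =>
          keepsB (t :: rest) r && decide (ga t + gb t < ga r + gb r)) : Int)
      else -1) := by
  have hget : PySem.List.pyGet? (t :: rest) (0 : Int) = some t := by
    simp [PySem.List.pyGet?, PySem.List.pyIdx?]
  have hsl : (PySem.List.sorted2 (t :: rest)
      (fun x => -(PySem.List.pyGetD x 0 0)) (fun x => PySem.List.pyGetD x 1 0)) =
      pvSorted (t :: rest) := rfl
  have hperm := pvSorted_perm (t :: rest)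
  have hpw := pvSorted_pairwise (t :: rest)
  have hs1 : solution (t :: rest) = solutionLoop t (pvSorted (t :: rest)) (-1) 1 := by
    unfold solution
    rw [hget, hsl]
  rw [hs1]
  cases hk : keepsB (t :: rest) t
  · have hk' : ¬(pvNotDom (t :: rest) t ∧ -1 ≤ gb t) := by
      rw [← keepsB_iff (t :: rest) t, hk]
      simp
    simp only [Bool.false_eq_true, if_false]
    exact loop_bad (t :: rest) t hlen hk' (pvSorted (t :: rest)) [] 1
      (by simpa using hpw) (by simpa using hperm)
      ⟨t, hperm.mem_iff.mpr List.mem_cons_self, rfl, rfl⟩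
  · have hk' := (keepsB_iff (t :: rest) t).mp hk
    have hsafe : ∀ r ∈ (t :: rest), ga r = ga t ∧ gb r = gb t →
        pvNotDom (t :: rest) r ∧ -1 ≤ gb r := by
      rintro r _ ⟨h0, h1⟩
      exact ⟨(notDom_val h0 h1).mpr hk'.1, by rw [h1]; exact hk'.2⟩
    have h2 := loop_count (t :: rest) t hlen (hlen t List.mem_cons_self) hsafe
      (pvSorted (t :: rest)) [] 1 (by simpa using hpw) (by simpa using hperm)
    rw [hperm.countP_eq] at h2
    simpa using h2

-- ===== VERDICT (by name: the statement is the Claim_ definition above) =====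
theorem solution_spec : Claim_unchanged_solution := by
  intro scores _ hpre hnd
  obtain ⟨hne, hlen⟩ := hpre
  obtain ⟨t, rest, rfl⟩ : ∃ t rest, scores = t :: rest := by
    cases scores with
    | nil => exact absurd rfl hne
    | cons t rest => exact ⟨t, rest, rfl⟩
  show solution (t :: rest) = solution_alt (t :: rest)
  rw [solution_eq t rest hlen, solution_alt_eq t rest]
  by_cases hdom : pvNotDom (t :: rest) t
  · have hnop : ∀ p ∈ (t :: rest), p.getD 1 0 < -1 → pvNotDom (t :: rest) p →
        ¬(p = t ∨ pvSum t < pvSum p) := by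
      intro p hp h1 h2 h3
      exact hnd ⟨hdom, p, hp, h1, h2, h3⟩
    have hge : -1 ≤ gb t := by
      by_contra h
      push_neg at h
      exact hnop t List.mem_cons_self (by unfold gb at h; omega) hdom (Or.inl rfl)
    have hk : keepsB (t :: rest) t = true :=
      (keepsB_iff (t :: rest) t).mpr ⟨hdom, hge⟩
    have hdb : pvNotDomB (t :: rest) t = true := (pvNotDomB_iff _ _).mpr hdom
    rw [hk, hdb, if_pos rfl, if_pos rfl]
    have hc : ((t :: rest).countP fun r =>
          keepsB (t :: rest) r && decide (ga t + gb t < ga r + gb r)) =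
        ((t :: rest).countP fun p =>
          pvNotDomB (t :: rest) p && decide (ga t + gb t < ga p + gb p)) := by
      apply List.countP_congr
      intro p hp
      simp only [Bool.and_eq_true, keepsB_iff, pvNotDomB_iff, decide_eq_true_eq]
      constructor
      · rintro ⟨h1, h2⟩
        exact ⟨h1.1, h2⟩
      · rintro ⟨h1, h2⟩
        refine ⟨⟨h1, ?_⟩, h2⟩
        by_contra hlt
        push_neg at hlt
        refine hnop p hp (by unfold gb at hlt; omega) h1 (Or.inr ?_)
        unfold pvSum
        unfold ga gb at h2
        omega
    rw [hc]
  · have hk : keepsB (t :: rest) t = false := by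
      rw [← Bool.not_eq_true, keepsB_iff]
      rintro ⟨h1, _⟩
      exact hdom h1
    have hdb : pvNotDomB (t :: rest) t = false := by
      rw [← Bool.not_eq_true, pvNotDomB_iff]
      exact hdom
    rw [hk, hdb]
    simp

theorem solution_changed : Claim_changed_solution := by
  unfold Claim_changed_solution; decide

theorem solution_tight : Claim_exact_solution := by
  intro scores _ hpre hd
  obtain ⟨hne, hlen⟩ := hpre
  obtain ⟨t, rest, rfl⟩ : ∃ t rest, scores = t :: rest := by
    cases scores with
    | nil => exact absurd rfl hne
    | cons t rest => exact ⟨t, rest, rfl⟩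
  obtain ⟨hdom, p, hp, hpb, hpnd, hpor⟩ := hd
  have hdom' : pvNotDom (t :: rest) t := by simpa [List.headI] using hdom
  have hdb : pvNotDomB (t :: rest) t = true := (pvNotDomB_iff _ _).mpr hdom'
  rw [solution_eq t rest hlen, solution_alt_eq t rest, hdb, if_pos rfl]
  have hcnt_nonneg : (0 : Int) ≤ (((t :: rest).countP fun p =>
      pvNotDomB (t :: rest) p && decide (ga t + gb t < ga p + gb p)) : Int) :=
    Int.natCast_nonneg _
  by_cases hge : -1 ≤ gb t
  · -- the undercount case: some non-dominated p with gb p < -1 and a bigger sum exists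
    have hk : keepsB (t :: rest) t = true := (keepsB_iff _ _).mpr ⟨hdom', hge⟩
    rw [hk, if_pos rfl]
    have hpsum : t.getD 0 0 + t.getD 1 0 < p.getD 0 0 + p.getD 1 0 := by
      rcases hpor with rfl | h
      · exfalso
        unfold gb at hge
        omega
      · simpa [List.headI, pvSum] using h
    have hlt : ((t :: rest).countP fun r =>
          keepsB (t :: rest) r && decide (ga t + gb t < ga r + gb r)) <
        ((t :: rest).countP fun p =>
          pvNotDomB (t :: rest) p && decide (ga t + gb t < ga p + gb p)) := by
      refine countP_lt _ _ _ ?_ p hp ?_ ?_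
      · intro x _ hx
        simp only [Bool.and_eq_true, keepsB_iff] at hx
        simp only [Bool.and_eq_true]
        exact ⟨(pvNotDomB_iff _ _).mpr hx.1.1, hx.2⟩
      · simp only [Bool.and_eq_false_iff]
        left
        rw [← Bool.not_eq_true, keepsB_iff]
        rintro ⟨_, hb⟩
        unfold gb at hb
        omega
      · simp only [Bool.and_eq_true, pvNotDomB_iff, decide_eq_true_eq]
        exact ⟨hpnd, by unfold ga gb; omega⟩
    intro heq
    omega
  · -- the sentinel -1 case: A answers -1, B answers a positive count
    have hk : keepsB (t :: rest) t = false := by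
      rw [← Bool.not_eq_true, keepsB_iff]
      rintro ⟨_, h⟩
      exact hge h
    rw [hk]
    simp only [Bool.false_eq_true, if_false]
    omega
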